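-- pv_equiv track=rewrite | github.com/chiarabigi/strawberry_picking_order_prediction | utils.py | heuristic_sched
-- ===== SOURCE A (Python) =====
-- def heuristic_sched(all_ripe_min_dist, occ_ann):
--     neither = []
--     occluding = []
--     occluded_occluding = []
--     occluded = []
--     for k in range(len(all_ripe_min_dist)):
--         if occ_ann[k] == 3:
--             neither.append(all_ripe_min_dist[k])
--         elif occ_ann[k] == 1:
--             occluding.append(all_ripe_min_dist[k])
--         elif occ_ann[k] == 2:
--             occluded_occluding.append(all_ripe_min_dist[k])
--         elif occ_ann[k] == 0:
--             occluded.append(all_ripe_min_dist[k])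
--
--     neither_sorted_indices = sorted(range(len(neither)), reverse=True, key=lambda k: neither[k])
--     occluding_sorted_indices = [x + len(neither) for x in
--                                 sorted(range(len(occluding)), reverse=True, key=lambda k: occluding[k])]
--     occluded_occluding_sorted_indices = [x + len(neither) + len(occluding) for x in
--                                          sorted(range(len(occluded_occluding)), reverse=True,
--                                                 key=lambda k: occluded_occluding[k])]
--     occluded_sorted_indices = [x + len(neither) + len(occluding) + len(occluded_occluding_sorted_indices) for x in
--                                sorted(range(len(occluded)), reverse=True, key=lambda k: occluded[k])]
--
--     scheduling_script1 = neither_sorted_indices + occluding_sorted_indices + occluded_occluding_sorted_indices + occluded_sorted_indices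
--     scheduling_script1 = [x + 1 for x in scheduling_script1]
--
--     return scheduling_script1
-- ===== SOURCE B (Python) =====
-- def heuristic_sched(all_ripe_min_dist, occ_ann):
--     prio = {3: 0, 1: 1, 2: 2, 0: 3}
--     counts = {0: 0, 1: 0, 2: 0, 3: 0}
--     tagged = []
--     for v, a in zip(all_ripe_min_dist, occ_ann):
--         if a in prio:
--             p = prio[a]
--             tagged.append((p, counts[p], v))
--             counts[p] = counts[p] + 1
--     offsets = {0: 0,
--                1: counts[0],
--                2: counts[0] + counts[1],
--                3: counts[0] + counts[1] + counts[2]}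
--     tagged.sort(key=lambda t: -t[2])   # value descending, stable
--     tagged.sort(key=lambda t: t[0])    # then priority ascending, stable
--     return [offsets[p] + r + 1 for p, r, _ in tagged]
-- ===== Notes on version B (the rewrite author's own statement) =====
-- stated objective: alternative
-- what changed: Instead of four separate per-group index sorts concatenated with manually accumulated offsets, B tags each kept element with its priority and appearance rank in one pass over zip(dist, ann), then performs two stable sort passes (value descending, then priority ascending) and emits offset[priority] + rank + 1 per element.
import Mathlib
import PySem

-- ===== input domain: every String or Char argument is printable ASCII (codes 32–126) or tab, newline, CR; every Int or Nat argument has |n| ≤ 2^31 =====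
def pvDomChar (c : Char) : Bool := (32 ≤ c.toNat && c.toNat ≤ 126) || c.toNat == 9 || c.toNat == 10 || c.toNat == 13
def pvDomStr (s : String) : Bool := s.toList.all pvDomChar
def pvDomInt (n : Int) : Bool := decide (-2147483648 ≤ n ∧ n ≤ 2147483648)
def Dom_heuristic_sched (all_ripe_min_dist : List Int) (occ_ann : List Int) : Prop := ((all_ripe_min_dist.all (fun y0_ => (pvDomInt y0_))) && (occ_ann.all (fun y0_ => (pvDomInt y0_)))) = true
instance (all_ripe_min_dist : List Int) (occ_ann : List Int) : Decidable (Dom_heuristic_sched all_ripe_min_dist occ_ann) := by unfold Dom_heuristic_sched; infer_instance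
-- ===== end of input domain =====

-- B replaces A's four per-group index sorts plus manual offset concatenation by one tagging pass
-- (priority + appearance rank per element) followed by two stable sort passes (value desc, then
-- priority asc); objective: alternative decomposition, same asymptotic cost.

-- ===== PORT A =====
-- the body of A's 'for k in range(len(all_ripe_min_dist))' loop (elif chain, four accumulators)
def pvAStep (all_ripe_min_dist : List Int) (occ_ann : List Int)
    (s : List Int × List Int × List Int × List Int) (k : Int) :
    List Int × List Int × List Int × List Int :=
  if PySem.List.pyGetD occ_ann k 0 == 3 then
    (s.1 ++ [PySem.List.pyGetD all_ripe_min_dist k 0], s.2.1, s.2.2.1, s.2.2.2)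
  else if PySem.List.pyGetD occ_ann k 0 == 1 then
    (s.1, s.2.1 ++ [PySem.List.pyGetD all_ripe_min_dist k 0], s.2.2.1, s.2.2.2)
  else if PySem.List.pyGetD occ_ann k 0 == 2 then
    (s.1, s.2.1, s.2.2.1 ++ [PySem.List.pyGetD all_ripe_min_dist k 0], s.2.2.2)
  else if PySem.List.pyGetD occ_ann k 0 == 0 then
    (s.1, s.2.1, s.2.2.1, s.2.2.2 ++ [PySem.List.pyGetD all_ripe_min_dist k 0])
  else s

-- occ_ann[k] is in range for every k the loop visits exactly when Pre_ holds (else Python raises IndexError)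
def heuristic_sched (all_ripe_min_dist : List Int) (occ_ann : List Int) : List Int :=
  let st := (PySem.List.pyRange 0 (PySem.List.len all_ripe_min_dist) 1).foldl
              (pvAStep all_ripe_min_dist occ_ann) ([], [], [], [])
  let neither := st.1
  let occluding := st.2.1
  let occluded_occluding := st.2.2.1
  let occluded := st.2.2.2
  let neither_sorted_indices :=
    PySem.List.sorted (PySem.List.pyRange 0 (PySem.List.len neither) 1)
      (fun k => PySem.List.pyGetD neither k 0) true
  let occluding_sorted_indices :=
    (PySem.List.sorted (PySem.List.pyRange 0 (PySem.List.len occluding) 1)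
      (fun k => PySem.List.pyGetD occluding k 0) true).map
      (fun x => x + PySem.List.len neither)
  let occluded_occluding_sorted_indices :=
    (PySem.List.sorted (PySem.List.pyRange 0 (PySem.List.len occluded_occluding) 1)
      (fun k => PySem.List.pyGetD occluded_occluding k 0) true).map
      (fun x => x + PySem.List.len neither + PySem.List.len occluding)
  let occluded_sorted_indices :=
    (PySem.List.sorted (PySem.List.pyRange 0 (PySem.List.len occluded) 1)
      (fun k => PySem.List.pyGetD occluded k 0) true).map
      (fun x => x + PySem.List.len neither + PySem.List.len occluding
                  + PySem.List.len occluded_occluding_sorted_indices)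
  let scheduling_script1 := neither_sorted_indices ++ occluding_sorted_indices
                              ++ occluded_occluding_sorted_indices ++ occluded_sorted_indices
  scheduling_script1.map (fun x => x + 1)

-- ===== PORT B =====
def pvPrio : PySem.Dict Int Int := PySem.Dict.ofList [(3, 0), (1, 1), (2, 2), (0, 3)]

-- the body of B's 'for v, a in zip(...)' loop ('a in prio' + 'prio[a]' as one lookup)
def pvBStep (s : PySem.Dict Int Int × List (Int × Int × Int)) (va : Int × Int) :
    PySem.Dict Int Int × List (Int × Int × Int) :=
  match PySem.Dict.get? pvPrio va.2 with
  | some p => (PySem.Dict.insert s.1 p (PySem.Dict.getD s.1 p 0 + 1),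
               s.2 ++ [(p, PySem.Dict.getD s.1 p 0, va.1)])
  | none => s

def heuristic_sched_alt (all_ripe_min_dist : List Int) (occ_ann : List Int) : List Int :=
  let st := (all_ripe_min_dist.zip occ_ann).foldl pvBStep
              (PySem.Dict.ofList [(0, 0), (1, 0), (2, 0), (3, 0)], [])
  let counts := st.1
  let offsets : PySem.Dict Int Int := PySem.Dict.ofList
    [(0, 0),
     (1, PySem.Dict.getD counts 0 0),
     (2, PySem.Dict.getD counts 0 0 + PySem.Dict.getD counts 1 0),
     (3, PySem.Dict.getD counts 0 0 + PySem.Dict.getD counts 1 0 + PySem.Dict.getD counts 2 0)]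
  let t1 := PySem.List.sorted st.2 (fun t => -t.2.2) false
  let t2 := PySem.List.sorted t1 (fun t => t.1) false
  t2.map (fun t => PySem.Dict.getD offsets t.1 0 + t.2.1 + 1)

-- ===== PRECONDITION & SPEC =====
-- Pre_ excludes exactly the inputs where A raises IndexError (occ_ann shorter than all_ripe_min_dist)
def Pre_heuristic_sched (all_ripe_min_dist : List Int) (occ_ann : List Int) : Prop :=
  all_ripe_min_dist.length ≤ occ_ann.length
instance (all_ripe_min_dist : List Int) (occ_ann : List Int) : Decidable (Pre_heuristic_sched all_ripe_min_dist occ_ann) := by unfold Pre_heuristic_sched; infer_instance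
def pvWitness_heuristic_sched : List Int × List Int := ([2, 1, 3, 5, 4], [3, 0, 1, 3, 2])

def Spec_heuristic_sched (all_ripe_min_dist : List Int) (occ_ann : List Int) (out : List Int) : Prop := out = heuristic_sched_alt all_ripe_min_dist occ_ann
instance (all_ripe_min_dist : List Int) (occ_ann : List Int) (out : List Int) : Decidable (Spec_heuristic_sched all_ripe_min_dist occ_ann out) := by unfold Spec_heuristic_sched; infer_instance

-- ===== CLAIM (what is proved, stated in full; the proofs are below) =====
def Claim_equal_heuristic_sched : Prop := ∀ (all_ripe_min_dist : List Int) (occ_ann : List Int), Dom_heuristic_sched all_ripe_min_dist occ_ann → Pre_heuristic_sched all_ripe_min_dist occ_ann → Spec_heuristic_sched all_ripe_min_dist occ_ann (heuristic_sched all_ripe_min_dist occ_ann)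
-- ===== LEMMAS AND PROOFS =====

-- the values of the elements of l (pairs (value, annotation)) whose annotation is c
def pvG (c : Int) (l : List (Int × Int)) : List Int :=
  (l.filter (fun va => va.2 == c)).map Prod.fst

-- A's per-group descending stable index sort
def pvS (g : List Int) : List Int :=
  PySem.List.sorted (PySem.List.pyRange 0 (PySem.List.len g) 1)
    (fun k => PySem.List.pyGetD g k 0) true

-- one priority block of the decomposed result, as tagged triples (priority, rank, value)
def pvBlock (p : Int) (g : List Int) : List (Int × Int × Int) :=
  (pvS g).map (fun k => (p, k, PySem.List.pyGetD g k 0))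

-- appearance order within a priority class
def pvQ (t u : Int × Int × Int) : Prop := t.1 = u.1 → t.2.1 < u.2.1

-- the total order the double stable sort realises
def pvR (t u : Int × Int × Int) : Prop :=
  t.1 < u.1 ∨ (t.1 = u.1 ∧ (-t.2.2 < -u.2.2 ∨ (-t.2.2 = -u.2.2 ∧ pvQ t u)))

-- the annotation value that is mapped to priority p
def pvAnnOf (p : Int) : Int := if p = 0 then 3 else if p = 1 then 1 else if p = 2 then 2 else 0

theorem pvPrio_get? (a : Int) : PySem.Dict.get? pvPrio a =
    (if a = 3 then some 0 else if a = 1 then some 1 else if a = 2 then some 2 else if a = 0 then some 3 else none) := by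
  by_cases h3 : a = 3
  · subst h3; decide
  by_cases h1 : a = 1
  · subst h1; decide
  by_cases h2 : a = 2
  · subst h2; decide
  by_cases h0 : a = 0
  · subst h0; decide
  rw [if_neg h3, if_neg h1, if_neg h2, if_neg h0]
  have h : pvPrio = PySem.Dict.mk [(3, 0), (1, 1), (2, 2), (0, 3)] := by decide
  rw [h]
  simp only [PySem.Dict.get?]
  simp
  omega

theorem pv_length_pyRange (n : Nat) : (PySem.List.pyRange 0 (n : Int) 1).length = n := by
  induction n with
  | zero => simp [PySem.List.pyRange]
  | succ k ih =>
      rw [show ((k + 1 : Nat) : Int) = (k : Int) + 1 by push_cast; ring,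
          PySem.List.pyRange_one_succ_right (by positivity)]
      simp [ih]

theorem pv_pairwise_pyRange (n : Nat) : (PySem.List.pyRange 0 (n : Int) 1).Pairwise (· < ·) := by
  induction n with
  | zero => simp [PySem.List.pyRange]
  | succ k ih =>
      rw [show ((k + 1 : Nat) : Int) = (k : Int) + 1 by push_cast; ring,
          PySem.List.pyRange_one_succ_right (by positivity)]
      refine List.pairwise_append.mpr ⟨ih, by simp, ?_⟩
      intro x hx y hy
      rcases PySem.List.mem_pyRange_one.mp hx with ⟨_, hlt⟩
      simp at hy
      omega

-- a single stable insertion keeps the "key order with tie-break S" pairwise invariant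
theorem pv_insertBy_pairwise {α : Type} (key : α → Int) (S : α → α → Prop) (x : α) :
    ∀ acc : List α,
      acc.Pairwise (fun a b => key a < key b ∨ (key a = key b ∧ S a b)) →
      (∀ a ∈ acc, key a = key x → S a x) →
      (PySem.List.insertBy (fun a b => decide (key a < key b)) x acc).Pairwise
        (fun a b => key a < key b ∨ (key a = key b ∧ S a b)) := by
  intro acc
  induction acc with
  | nil => intro _ _; simp [PySem.List.insertBy]
  | cons y ys ih =>
      intro hpw hx
      rw [List.pairwise_cons] at hpw
      obtain ⟨hy, hys⟩ := hpw
      show (if decide (key x < key y) = true then x :: y :: ys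
            else y :: PySem.List.insertBy _ x ys).Pairwise _
      split_ifs with hlt
      · simp only [decide_eq_true_eq] at hlt
        refine List.pairwise_cons.mpr ⟨?_, List.pairwise_cons.mpr ⟨hy, hys⟩⟩
        intro b hb
        rcases List.mem_cons.mp hb with rfl | hb
        · exact Or.inl hlt
        · rcases hy b hb with h | ⟨he, _⟩
          · exact Or.inl (by omega)
          · exact Or.inl (by omega)
      · simp only [decide_eq_true_eq] at hlt
        refine List.pairwise_cons.mpr ⟨?_, ih hys (fun a ha he => hx a (List.mem_cons_of_mem y ha) he)⟩
        intro b hb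
        rcases (PySem.List.mem_insertBy _ x b ys).mp hb with rfl | hb
        · by_cases he : key y = key b
          · exact Or.inr ⟨he, hx y (List.mem_cons_self) he⟩
          · exact Or.inl (by omega)
        · exact hy b hb
-- stability of PySem's sort: any tie-break relation S pairwise on the input survives inside ties
theorem pv_sorted_stable {α : Type} (key : α → Int) (S : α → α → Prop) (xs : List α)
    (h : xs.Pairwise fun a b => key a = key b → S a b) :
    (PySem.List.sorted xs key false).Pairwise
      (fun a b => key a < key b ∨ (key a = key b ∧ S a b)) := by
  rw [PySem.List.sorted_eq_foldl_insertBy]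
  suffices H : ∀ (l : List α) (acc : List α),
      acc.Pairwise (fun a b => key a < key b ∨ (key a = key b ∧ S a b)) →
      (∀ a ∈ acc, ∀ b ∈ l, key a = key b → S a b) →
      l.Pairwise (fun a b => key a = key b → S a b) →
      (l.foldl (fun acc x => PySem.List.insertBy (fun a b => decide (key a < key b)) x acc) acc).Pairwise
        (fun a b => key a < key b ∨ (key a = key b ∧ S a b)) by
    exact H xs [] (by simp) (by simp) h
  intro l
  induction l with
  | nil => intro acc h1 _ _; simpa using h1
  | cons x t ih =>
      intro acc h1 h2 h3
      rw [List.pairwise_cons] at h3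
      obtain ⟨hx, ht⟩ := h3
      simp only [List.foldl_cons]
      refine ih _ (pv_insertBy_pairwise key S x acc h1 (fun a ha => h2 a ha x List.mem_cons_self)) ?_ ht
      intro a ha b hb he
      rcases (PySem.List.mem_insertBy _ x a acc).mp ha with rfl | ha
      · exact hx b hb he
      · exact h2 a ha b (List.mem_cons_of_mem x hb) he
theorem pv_sorted_rev_eq {α : Type} (xs : List α) (key : α → Int) :
    PySem.List.sorted xs key true = PySem.List.sorted xs (fun a => -key a) false := by
  rw [PySem.List.sorted_rev_eq_foldl_insertBy, PySem.List.sorted_eq_foldl_insertBy]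
  have h : (fun (a b : α) => decide (key b < key a)) = (fun a b => decide (-key a < -key b)) := by
    funext a b
    simp only [decide_eq_decide]
    omega
  rw [h]

theorem pv_sorted_rev_stable {α : Type} (key : α → Int) (S : α → α → Prop) (xs : List α)
    (h : xs.Pairwise fun a b => key a = key b → S a b) :
    (PySem.List.sorted xs key true).Pairwise
      (fun a b => key b < key a ∨ (key a = key b ∧ S a b)) := by
  rw [pv_sorted_rev_eq]
  have h' : xs.Pairwise fun a b => -key a = -key b → S a b := by
    refine h.imp ?_
    intro a b hab hneg
    exact hab (by omega)
  refine (pv_sorted_stable (fun a => -key a) S xs h').imp ?_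
  intro a b hab
  rcases hab with hlt | ⟨heq, hs⟩
  · exact Or.inl (by omega)
  · exact Or.inr ⟨by omega, hs⟩

theorem pvR_asymm {t u : Int × Int × Int} (h1 : pvR t u) (h2 : pvR u t) : False := by
  rcases h1 with ha | ⟨ea, hb | ⟨eb, hq⟩⟩ <;>
    rcases h2 with hc | ⟨ec, hd | ⟨ed, hq'⟩⟩ <;>
      first
        | omega
        | (exact absurd (hq' ec) (by have := hq ea; omega))
        | (exact absurd (hq ea) (by omega))
        | (exact absurd (hq' ec) (by omega))

theorem pv_perm_filter_four {α : Type} (f : α → Int) (l : List α)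
    (h : ∀ t ∈ l, f t = 0 ∨ f t = 1 ∨ f t = 2 ∨ f t = 3) :
    l.Perm (l.filter (fun t => f t == 0) ++ l.filter (fun t => f t == 1)
            ++ l.filter (fun t => f t == 2) ++ l.filter (fun t => f t == 3)) := by
  induction l with
  | nil => simp
  | cons a t ih =>
      have iht := ih (fun x hx => h x (List.mem_cons_of_mem a hx))
      rcases h a List.mem_cons_self with e | e | e | e
      · simp only [List.filter_cons, e]
        norm_num
        simpa [List.append_assoc] using iht
      · simp only [List.filter_cons, e]
        norm_num
        refine (iht.cons a).trans ?_
        simp only [List.append_assoc, List.cons_append]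
        exact (List.perm_middle).symm
      · simp only [List.filter_cons, e]
        norm_num
        refine (iht.cons a).trans ?_
        simp only [List.append_assoc, List.cons_append]
        have := (List.perm_middle (a := a)
          (l₁ := t.filter (fun t => f t == 0) ++ t.filter (fun t => f t == 1))
          (l₂ := t.filter (fun t => f t == 2) ++ t.filter (fun t => f t == 3))).symm
        simpa using this
      · simp only [List.filter_cons, e]
        norm_num
        refine (iht.cons a).trans ?_
        simp only [List.append_assoc, List.cons_append]
        have := (List.perm_middle (a := a)
          (l₁ := t.filter (fun t => f t == 0) ++ (t.filter (fun t => f t == 1) ++ t.filter (fun t => f t == 2)))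
          (l₂ := t.filter (fun t => f t == 3))).symm
        simpa using this
-- the B fold invariant: counts hold group sizes, the tagged list filtered at p is the
-- enumeration of group p, priorities are 0..3, and ranks increase within a priority
theorem pv_bfold_inv (l : List (Int × Int)) :
    (∀ p, (p = 0 ∨ p = 1 ∨ p = 2 ∨ p = 3) →
      PySem.Dict.getD (l.foldl pvBStep (PySem.Dict.ofList [(0,0),(1,0),(2,0),(3,0)], [])).1 p 0
        = ((pvG (pvAnnOf p) l).length : Int))
    ∧ (∀ p, (p = 0 ∨ p = 1 ∨ p = 2 ∨ p = 3) →
      (l.foldl pvBStep (PySem.Dict.ofList [(0,0),(1,0),(2,0),(3,0)], [])).2.filter (fun t => t.1 == p)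
        = (PySem.List.enumerate (pvG (pvAnnOf p) l) 0).map (fun jv => (p, jv.1, jv.2)))
    ∧ (∀ t ∈ (l.foldl pvBStep (PySem.Dict.ofList [(0,0),(1,0),(2,0),(3,0)], [])).2,
        t.1 = 0 ∨ t.1 = 1 ∨ t.1 = 2 ∨ t.1 = 3)
    ∧ (l.foldl pvBStep (PySem.Dict.ofList [(0,0),(1,0),(2,0),(3,0)], [])).2.Pairwise pvQ := by
  induction l using List.reverseRecOn with
  | nil =>
      refine ⟨?_, ?_, by simp, by simp⟩
      · rintro p (rfl | rfl | rfl | rfl) <;> simp [pvG] <;> decide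
      · rintro p (rfl | rfl | rfl | rfl) <;> simp [pvG, PySem.List.enumerate]
  | append_singleton l va ih =>
      obtain ⟨ih1, ih2, ih3, ih4⟩ := ih
      rw [List.foldl_append, List.foldl_cons, List.foldl_nil]
      rcases e : PySem.Dict.get? pvPrio va.2 with _ | p
      · -- annotation not recognised: state unchanged, groups unchanged
        have hnone : ∀ q, (q = 0 ∨ q = 1 ∨ q = 2 ∨ q = 3) → (va.2 == pvAnnOf q) = false := by
          rw [pvPrio_get?] at e
          rintro q (rfl | rfl | rfl | rfl) <;> (split_ifs at e <;> simp_all [pvAnnOf])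
        have hG : ∀ q, (q = 0 ∨ q = 1 ∨ q = 2 ∨ q = 3) → pvG (pvAnnOf q) (l ++ [va]) = pvG (pvAnnOf q) l := by
          intro q hq
          simp [pvG, List.filter_append, hnone q hq]
        simp only [pvBStep, e]
        exact ⟨fun p hp => by rw [hG p hp]; exact ih1 p hp,
               fun p hp => by rw [hG p hp]; exact ih2 p hp, ih3, ih4⟩
      · have hp : (p = 0 ∧ va.2 = 3) ∨ (p = 1 ∧ va.2 = 1) ∨ (p = 2 ∧ va.2 = 2) ∨ (p = 3 ∧ va.2 = 0) := by
          rw [pvPrio_get?] at e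
          split_ifs at e <;> simp_all
        have hpmem : p = 0 ∨ p = 1 ∨ p = 2 ∨ p = 3 := by rcases hp with ⟨rfl,_⟩|⟨rfl,_⟩|⟨rfl,_⟩|⟨rfl,_⟩ <;> simp
        have hva : va.2 = pvAnnOf p := by
          rcases hp with ⟨rfl,h⟩|⟨rfl,h⟩|⟨rfl,h⟩|⟨rfl,h⟩ <;> simp [pvAnnOf, h]
        have hinj : ∀ q, (q = 0 ∨ q = 1 ∨ q = 2 ∨ q = 3) → q ≠ p → (pvAnnOf p == pvAnnOf q) = false := by
          rintro q (rfl | rfl | rfl | rfl) hne <;>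
            rcases hpmem with rfl | rfl | rfl | rfl <;> simp_all [pvAnnOf]
        have hGp : pvG (pvAnnOf p) (l ++ [va]) = pvG (pvAnnOf p) l ++ [va.1] := by
          simp [pvG, List.filter_append, hva]
        have hGq : ∀ q, (q = 0 ∨ q = 1 ∨ q = 2 ∨ q = 3) → q ≠ p → pvG (pvAnnOf q) (l ++ [va]) = pvG (pvAnnOf q) l := by
          intro q hq hne
          simp [pvG, List.filter_append, hva, hinj q hq hne]
        simp only [pvBStep, e]
        refine ⟨?_, ?_, ?_, ?_⟩
        · intro q hq
          rw [PySem.Dict.getD_insert]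
          by_cases hqp : q = p
          · subst hqp
            rw [if_pos rfl, ih1 q hq, hGp]
            simp
          · rw [if_neg hqp, ih1 q hq, hGq q hq hqp]
        · intro q hq
          rw [List.filter_append]
          by_cases hqp : q = p
          · subst hqp
            rw [hGp, PySem.List.enumerate_append, List.map_append]
            have h1 : List.filter (fun t => t.1 == q) [(q, PySem.Dict.getD (List.foldl pvBStep (PySem.Dict.ofList [(0, 0), (1, 0), (2, 0), (3, 0)], []) l).1 q 0, va.1)] = [(q, PySem.Dict.getD (List.foldl pvBStep (PySem.Dict.ofList [(0, 0), (1, 0), (2, 0), (3, 0)], []) l).1 q 0, va.1)] := by simp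
            rw [h1, ih2 q hq, ih1 q hq]
            congr 1
            simp [PySem.List.enumerate]
          · have h1 : List.filter (fun t => t.1 == q) [(p, PySem.Dict.getD (List.foldl pvBStep (PySem.Dict.ofList [(0, 0), (1, 0), (2, 0), (3, 0)], []) l).1 p 0, va.1)] = [] := by
              simp
              omega
            rw [h1, List.append_nil, hGq q hq hqp, ih2 q hq]
        · intro t ht
          rcases List.mem_append.mp ht with h | h
          · exact ih3 t h
          · simp at h
            subst h
            simpa using hpmem
        · rw [List.pairwise_append]
          refine ⟨ih4, by simp [pvQ], ?_⟩
          intro u hu t' ht'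
          simp at ht'
          subst ht'
          intro hu1
          have humem : u ∈ (List.foldl pvBStep (PySem.Dict.ofList [(0, 0), (1, 0), (2, 0), (3, 0)], []) l).2.filter (fun t => t.1 == p) := by
            simp [List.mem_filter, hu, hu1]
          rw [ih2 p hpmem] at humem
          obtain ⟨jv, hjv, hju⟩ := List.mem_map.mp humem
          obtain ⟨k, hk, hjv'⟩ := (PySem.List.mem_enumerate_iff _ _ _).mp hjv
          rw [ih1 p hpmem]
          have : u.2.1 = (k : Int) := by rw [← hju, hjv']; simp
          simp [this]
          omega
theorem pvBlock_fst {p : Int} {g : List Int} : ∀ t ∈ pvBlock p g, t.1 = p := by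
  intro t ht
  obtain ⟨k, _, rfl⟩ := List.mem_map.mp ht
  rfl

theorem pvBlock_pairwise (p : Int) (g : List Int) : (pvBlock p g).Pairwise pvR := by
  unfold pvBlock pvS
  rw [List.pairwise_map]
  have hrange : (PySem.List.pyRange 0 (PySem.List.len g) 1).Pairwise
      (fun a b => PySem.List.pyGetD g a 0 = PySem.List.pyGetD g b 0 → a < b) := by
    simp only [PySem.List.len]
    refine List.Pairwise.imp ?_ (pv_pairwise_pyRange g.length)
    intro a b hab _
    exact hab
  have h := pv_sorted_rev_stable (fun k => PySem.List.pyGetD g k 0) (· < ·) _ hrange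
  refine h.imp ?_
  intro a b hab
  rcases hab with hlt | ⟨heq, hlt⟩ <;> beta_reduce at *
  · right
    refine ⟨rfl, ?_⟩
    left
    dsimp only
    omega
  · right
    refine ⟨rfl, ?_⟩
    right
    refine ⟨by dsimp only; omega, fun _ => ?_⟩
    dsimp only
    exact hlt

theorem pvBlock_perm (p : Int) (g : List Int) :
    (pvBlock p g).Perm ((PySem.List.enumerate g 0).map (fun jv => (p, jv.1, jv.2))) := by
  rw [PySem.List.enumerate_eq_map_pyRange g 0, List.map_map]
  exact (PySem.List.sorted_perm _ _ _).map _

-- the double stable sort of the tagged list is the concatenation of the four sorted blocks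
theorem pv_sort_decomp (tg : List (Int × Int × Int)) (ga gb gc gd : List Int)
    (h0 : tg.filter (fun t => t.1 == 0) = (PySem.List.enumerate ga 0).map (fun jv => ((0:Int), jv.1, jv.2)))
    (h1 : tg.filter (fun t => t.1 == 1) = (PySem.List.enumerate gb 0).map (fun jv => ((1:Int), jv.1, jv.2)))
    (h2 : tg.filter (fun t => t.1 == 2) = (PySem.List.enumerate gc 0).map (fun jv => ((2:Int), jv.1, jv.2)))
    (h3 : tg.filter (fun t => t.1 == 3) = (PySem.List.enumerate gd 0).map (fun jv => ((3:Int), jv.1, jv.2)))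
    (hmem : ∀ t ∈ tg, t.1 = 0 ∨ t.1 = 1 ∨ t.1 = 2 ∨ t.1 = 3)
    (hpw : tg.Pairwise pvQ) :
    PySem.List.sorted (PySem.List.sorted tg (fun t => -t.2.2) false) (fun t => t.1) false
      = pvBlock 0 ga ++ pvBlock 1 gb ++ pvBlock 2 gc ++ pvBlock 3 gd := by
  have hpw' : tg.Pairwise (fun a b => -a.2.2 = -b.2.2 → pvQ a b) := by
    refine hpw.imp ?_
    intro a b h _
    exact h
  have hY := pv_sorted_stable (fun t : Int × Int × Int => -t.2.2) pvQ tg hpw'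
  have hY' : (PySem.List.sorted tg (fun t => -t.2.2) false).Pairwise
      (fun a b => a.1 = b.1 → (-a.2.2 < -b.2.2 ∨ (-a.2.2 = -b.2.2 ∧ pvQ a b))) := by
    refine hY.imp ?_
    intro a b h _
    exact h
  have hZ := pv_sorted_stable (fun t : Int × Int × Int => t.1)
      (fun a b => -a.2.2 < -b.2.2 ∨ (-a.2.2 = -b.2.2 ∧ pvQ a b)) _ hY'
  have hZpw : (PySem.List.sorted (PySem.List.sorted tg (fun t => -t.2.2) false) (fun t => t.1) false).Pairwise pvR :=
    hZ.imp (fun h => h)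
  have cross : ∀ (p q : Int) (g g' : List Int), p < q → ∀ x ∈ pvBlock p g, ∀ y ∈ pvBlock q g', pvR x y := by
    intro p q g g' hpq x hx y hy
    exact Or.inl (by rw [pvBlock_fst x hx, pvBlock_fst y hy]; exact hpq)
  have hRpw : (pvBlock 0 ga ++ pvBlock 1 gb ++ pvBlock 2 gc ++ pvBlock 3 gd).Pairwise pvR := by
    rw [List.pairwise_append]
    refine ⟨?_, pvBlock_pairwise 3 gd, ?_⟩
    · rw [List.pairwise_append]
      refine ⟨?_, pvBlock_pairwise 2 gc, ?_⟩
      · rw [List.pairwise_append]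
        refine ⟨pvBlock_pairwise 0 ga, pvBlock_pairwise 1 gb, cross 0 1 ga gb (by norm_num)⟩
      · intro x hx y hy
        rcases List.mem_append.mp hx with h | h
        · exact cross 0 2 ga gc (by norm_num) x h y hy
        · exact cross 1 2 gb gc (by norm_num) x h y hy
    · intro x hx y hy
      rcases List.mem_append.mp hx with h | h
      · rcases List.mem_append.mp h with h' | h'
        · exact cross 0 3 ga gd (by norm_num) x h' y hy
        · exact cross 1 3 gb gd (by norm_num) x h' y hy
      · exact cross 2 3 gc gd (by norm_num) x h y hy
  have hperm : (PySem.List.sorted (PySem.List.sorted tg (fun t => -t.2.2) false) (fun t => t.1) false).Perm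
      (pvBlock 0 ga ++ pvBlock 1 gb ++ pvBlock 2 gc ++ pvBlock 3 gd) := by
    refine ((PySem.List.sorted_perm _ _ _).trans (PySem.List.sorted_perm _ _ _)).trans ?_
    refine (pv_perm_filter_four (fun t => t.1) tg hmem).trans ?_
    rw [h0, h1, h2, h3]
    exact (((((pvBlock_perm 0 ga).append (pvBlock_perm 1 gb)).append (pvBlock_perm 2 gc)).append (pvBlock_perm 3 gd))).symm
  exact List.Perm.eq_of_pairwise (fun a b _ _ hab hba => (pvR_asymm hab hba).elim) hZpw hRpw hperm
-- A's partition loop produces exactly the four annotation groups of the zipped input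
theorem pv_afold (all_ripe_min_dist occ_ann : List Int)
    (hpre : all_ripe_min_dist.length ≤ occ_ann.length) :
    ∀ n : Nat, n ≤ all_ripe_min_dist.length →
      (PySem.List.pyRange 0 (n : Int) 1).foldl (pvAStep all_ripe_min_dist occ_ann) ([], [], [], [])
        = (pvG 3 ((all_ripe_min_dist.zip occ_ann).take n),
           pvG 1 ((all_ripe_min_dist.zip occ_ann).take n),
           pvG 2 ((all_ripe_min_dist.zip occ_ann).take n),
           pvG 0 ((all_ripe_min_dist.zip occ_ann).take n)) := by
  intro n
  induction n with
  | zero => intro _; simp [PySem.List.pyRange, pvG]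
  | succ m ih =>
      intro hm
      have hmd : m < all_ripe_min_dist.length := by omega
      have hma : m < occ_ann.length := by omega
      have hmz : m < (all_ripe_min_dist.zip occ_ann).length := by simp [List.length_zip]; omega
      rw [show ((m + 1 : Nat) : Int) = (m : Int) + 1 by push_cast; ring,
          PySem.List.pyRange_one_succ_right (by positivity), List.foldl_append, ih (by omega)]
      have hz : (all_ripe_min_dist.zip occ_ann).take (m+1)
          = (all_ripe_min_dist.zip occ_ann).take m ++ [(all_ripe_min_dist[m], occ_ann[m])] := by
        rw [List.take_succ]
        simp [List.getElem?_eq_getElem hmz]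
      have hga : PySem.List.pyGetD occ_ann (m : Int) 0 = occ_ann[m] := by
        rw [PySem.List.pyGetD_natCast]
        exact List.getD_eq_getElem _ _ hma
      have hgd : PySem.List.pyGetD all_ripe_min_dist (m : Int) 0 = all_ripe_min_dist[m] := by
        rw [PySem.List.pyGetD_natCast]
        exact List.getD_eq_getElem _ _ hmd
      have hgc : ∀ c : Int, pvG c ((all_ripe_min_dist.zip occ_ann).take m ++ [(all_ripe_min_dist[m], occ_ann[m])])
          = pvG c ((all_ripe_min_dist.zip occ_ann).take m)
            ++ (if occ_ann[m] == c then [all_ripe_min_dist[m]] else []) := by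
        intro c
        simp only [pvG, List.filter_append, List.map_append, List.filter_cons, List.filter_nil]
        by_cases e : occ_ann[m] = c <;> simp [e]
      simp only [List.foldl_cons, List.foldl_nil, pvAStep, hga, hgd, hz, hgc]
      by_cases e3 : occ_ann[m] = 3
      · simp [e3]
      · by_cases e1 : occ_ann[m] = 1
        · simp [e3, e1]
        · by_cases e2 : occ_ann[m] = 2
          · simp [e3, e1, e2]
          · by_cases e0 : occ_ann[m] = 0
            · simp [e3, e1, e2, e0]
            · simp [e3, e1, e2, e0]
-- ===== VERDICT (by name: the statement is the Claim_ definition above) =====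
theorem pv_offsets_getD (z1 z2 z3 : Int) :
    PySem.Dict.getD (PySem.Dict.ofList [((0:Int),(0:Int)),(1,z1),(2,z2),(3,z3)]) 0 0 = 0
    ∧ PySem.Dict.getD (PySem.Dict.ofList [((0:Int),(0:Int)),(1,z1),(2,z2),(3,z3)]) 1 0 = z1
    ∧ PySem.Dict.getD (PySem.Dict.ofList [((0:Int),(0:Int)),(1,z1),(2,z2),(3,z3)]) 2 0 = z2
    ∧ PySem.Dict.getD (PySem.Dict.ofList [((0:Int),(0:Int)),(1,z1),(2,z2),(3,z3)]) 3 0 = z3 := by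
  refine ⟨?_, ?_, ?_, ?_⟩ <;>
    simp [PySem.Dict.ofList, PySem.Dict.update, PySem.Dict.insert, PySem.Dict.contains,
          PySem.Dict.empty, PySem.Dict.getD, PySem.Dict.get?]

theorem heuristic_sched_spec : Claim_equal_heuristic_sched := by
  intro dist ann _ hpre
  unfold Pre_heuristic_sched at hpre
  show heuristic_sched dist ann = heuristic_sched_alt dist ann
  obtain ⟨inv1, inv2, inv3, inv4⟩ := pv_bfold_inv (dist.zip ann)
  have htake : (dist.zip ann).take dist.length = dist.zip ann :=
    List.take_of_length_le (by simp)
  have hA := pv_afold dist ann hpre dist.length le_rfl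
  rw [htake] at hA
  have h0 := inv2 0 (by norm_num)
  have h1 := inv2 1 (by norm_num)
  have h2 := inv2 2 (by norm_num)
  have h3 := inv2 3 (by norm_num)
  rw [show pvAnnOf 0 = 3 by decide] at h0
  rw [show pvAnnOf 1 = 1 by decide] at h1
  rw [show pvAnnOf 2 = 2 by decide] at h2
  rw [show pvAnnOf 3 = 0 by decide] at h3
  have hdec := pv_sort_decomp _ _ _ _ _ h0 h1 h2 h3 inv3 inv4
  have c0 := inv1 0 (by norm_num)
  have c1 := inv1 1 (by norm_num)
  have c2 := inv1 2 (by norm_num)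
  rw [show pvAnnOf 0 = 3 by decide] at c0
  rw [show pvAnnOf 1 = 1 by decide] at c1
  rw [show pvAnnOf 2 = 2 by decide] at c2
  unfold heuristic_sched heuristic_sched_alt
  dsimp only
  rw [show PySem.List.len dist = (dist.length : Int) from rfl, hA, hdec]
  dsimp only
  simp only [List.map_append, List.map_map, pvBlock, pvS]
  obtain ⟨o0, o1, o2, o3⟩ := pv_offsets_getD (PySem.Dict.getD (List.foldl pvBStep (PySem.Dict.ofList [(0, 0), (1, 0), (2, 0), (3, 0)], []) (dist.zip ann)).1 0 0) (PySem.Dict.getD (List.foldl pvBStep (PySem.Dict.ofList [(0, 0), (1, 0), (2, 0), (3, 0)], []) (dist.zip ann)).1 0 0 + PySem.Dict.getD (List.foldl pvBStep (PySem.Dict.ofList [(0, 0), (1, 0), (2, 0), (3, 0)], []) (dist.zip ann)).1 1 0) (PySem.Dict.getD (List.foldl pvBStep (PySem.Dict.ofList [(0, 0), (1, 0), (2, 0), (3, 0)], []) (dist.zip ann)).1 0 0 + PySem.Dict.getD (List.foldl pvBStep (PySem.Dict.ofList [(0, 0), (1, 0), (2, 0), (3, 0)], []) (dist.zip ann)).1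 1 0 + PySem.Dict.getD (List.foldl pvBStep (PySem.Dict.ofList [(0, 0), (1, 0), (2, 0), (3, 0)], []) (dist.zip ann)).1 2 0)
  congr 1
  · congr 1
    · congr 1
      · -- block p = 0 (annotation 3)
        refine List.map_congr_left ?_
        intro k _
        dsimp only [Function.comp_apply]
        simp only [o0]
        omega
      · -- block p = 1 (annotation 1)
        refine List.map_congr_left ?_
        intro k _
        dsimp only [Function.comp_apply]
        rw [o1]
        simp only [c0]
        simp only [PySem.List.len]
        omega
    · -- block p = 2 (annotation 2)
      refine List.map_congr_left ?_
      intro k _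
      dsimp only [Function.comp_apply]
      rw [o2]
      simp only [c0, c1]
      simp only [PySem.List.len]
      omega
  · -- block p = 3 (annotation 0)
    refine List.map_congr_left ?_
    intro k _
    dsimp only [Function.comp_apply]
    rw [o3]
    simp only [c0, c1, c2]
    simp only [PySem.List.len, List.length_map, PySem.List.length_sorted, pv_length_pyRange]
    omega
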